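-- pv_equiv track=rewrite | github.com/soohyuncha/CodingSolve | code_codetree/samsung_25_1_1_p2.py | init_graph
-- ===== SOURCE A (Python) =====
-- def init_graph(map_2d, N):
--     def _is_up_possible(r, c, jump):
--         if (r-jump < 0) or (map_2d[r-jump][c] == "S"):
--             return False
--         for kk in range(1, jump+1):
--             if map_2d[r-kk][c] == "#":
--                 return False
--         return True
--     def _is_down_possible(r, c, jump):
--         if (r+jump > N-1) or (map_2d[r+jump][c] == "S"):
--             return False
--         for kk in range(1, jump+1):
--             if map_2d[r+kk][c] == "#":
--                 return False
--         return True
--     def _is_left_possible(r, c, jump):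
--         if (c-jump < 0) or (map_2d[r][c-jump] == "S"):
--             return False
--         for kk in range(1, jump+1):
--             if map_2d[r][c-kk] == "#":
--                 return False
--         return True
--     def _is_right_possible(r, c, jump):
--         if (c+jump > N-1) or (map_2d[r][c+jump] == "S"):
--             return False
--         for kk in range(1, jump+1):
--             if map_2d[r][c+kk] == "#":
--                 return False
--         return True
--     graph = []
--     for r in range(N):
--         graph.append([])
--         for c in range(N):
--             graph[r].append([])
--             if map_2d[r][c] != ".":
--                 continue
--             for k in range(5):
--                 jump = k+1
--                 graph[r][c].append([])
--                 # Case 1. Move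
--                 if _is_up_possible(r, c, jump):
--                     graph[r][c][k].append((1, r-jump, c, k))
--                 if _is_down_possible(r, c, jump):
--                     graph[r][c][k].append((1, r+jump, c, k))
--                 if _is_left_possible(r, c, jump):
--                     graph[r][c][k].append((1, r, c-jump, k))
--                 if _is_right_possible(r, c, jump):
--                     graph[r][c][k].append((1, r, c+jump, k))
--                 # Case 2. Increase
--                 if jump < 5:
--                     graph[r][c][k].append(((jump+1)**2, r, c, (jump+1)-1))
--                 # Case 3. Decrease
--                 if jump > 1:
--                     for kk in range(1, jump):
--                         graph[r][c][k].append((1, r, c, (jump-kk)-1))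
--     return graph
-- ===== SOURCE B (Python) =====
-- def init_graph(map_2d, N):
--     def _walk(r, c, dr, dc):
--         # flags[j-1]: can a jump of length j land from (r,c) in direction (dr,dc)?
--         flags = []
--         wall = False
--         for j in range(1, 6):
--             rr, cc = r + dr * j, c + dc * j
--             if not (0 <= rr < N and 0 <= cc < N):
--                 flags.append(False)
--             elif wall:
--                 flags.append(False)
--             else:
--                 ch = map_2d[rr][cc]
--                 if ch == "#":
--                     wall = True
--                     flags.append(False)
--                 else:
--                     flags.append(ch != "S")
--         return flags
--
--     graph = []
--     for r in range(N):
--         row = []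
--         for c in range(N):
--             if map_2d[r][c] != ".":
--                 row.append([])
--                 continue
--             up = _walk(r, c, -1, 0)
--             down = _walk(r, c, 1, 0)
--             left = _walk(r, c, 0, -1)
--             right = _walk(r, c, 0, 1)
--             cell = []
--             for k in range(5):
--                 jump = k + 1
--                 edges = []
--                 if up[k]:
--                     edges.append((1, r - jump, c, k))
--                 if down[k]:
--                     edges.append((1, r + jump, c, k))
--                 if left[k]:
--                     edges.append((1, r, c - jump, k))
--                 if right[k]:
--                     edges.append((1, r, c + jump, k))
--                 if jump < 5:
--                     edges.append(((jump + 1) ** 2, r, c, jump))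
--                 for kk in range(1, jump):
--                     edges.append((1, r, c, jump - kk - 1))
--                 cell.append(edges)
--             row.append(cell)
--         graph.append(row)
--     return graph
-- ===== Notes on version B (the rewrite author's own statement) =====
-- stated objective: alternative
-- what changed: Replaces the four per-jump helper functions that each rescan the whole corridor (O(jump) per query, redone for every jump length) with a single incremental outward walk per direction that carries a wall-seen flag and computes all five jump feasibilities in one pass.
import Mathlib
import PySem

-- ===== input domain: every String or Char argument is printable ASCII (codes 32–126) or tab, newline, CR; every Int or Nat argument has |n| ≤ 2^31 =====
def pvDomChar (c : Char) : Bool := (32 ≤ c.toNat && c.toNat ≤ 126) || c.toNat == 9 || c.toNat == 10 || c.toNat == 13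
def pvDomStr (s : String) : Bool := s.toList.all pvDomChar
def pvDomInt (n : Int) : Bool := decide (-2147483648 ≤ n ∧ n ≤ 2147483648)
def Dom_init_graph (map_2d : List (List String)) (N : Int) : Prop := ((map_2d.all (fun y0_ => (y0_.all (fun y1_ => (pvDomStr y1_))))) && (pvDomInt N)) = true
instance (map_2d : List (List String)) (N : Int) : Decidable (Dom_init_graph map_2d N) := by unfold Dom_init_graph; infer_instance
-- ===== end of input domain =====

-- B replaces A's four per-jump helper rescans by one outward walk per direction carrying a wall-seen flag (alternative decomposition, same result).

-- ===== PORT A =====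
-- safe 2-d access used by both ports; under Pre_ every index read is in range, so the defaults are never hit
def pvAt (m : List (List String)) (r c : Int) : String :=
  (PySem.List.pyGet? ((PySem.List.pyGet? m r).getD []) c).getD ""

def isUpA (m : List (List String)) (N r c jump : Int) : Bool :=
  if r - jump < 0 || pvAt m (r - jump) c == "S" then false
  else !((PySem.List.pyRange 1 (jump + 1) 1).any (fun kk => pvAt m (r - kk) c == "#"))

def isDownA (m : List (List String)) (N r c jump : Int) : Bool :=
  if r + jump > N - 1 || pvAt m (r + jump) c == "S" then false
  else !((PySem.List.pyRange 1 (jump + 1) 1).any (fun kk => pvAt m (r + kk) c == "#"))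

def isLeftA (m : List (List String)) (N r c jump : Int) : Bool :=
  if c - jump < 0 || pvAt m r (c - jump) == "S" then false
  else !((PySem.List.pyRange 1 (jump + 1) 1).any (fun kk => pvAt m r (c - kk) == "#"))

def isRightA (m : List (List String)) (N r c jump : Int) : Bool :=
  if c + jump > N - 1 || pvAt m r (c + jump) == "S" then false
  else !((PySem.List.pyRange 1 (jump + 1) 1).any (fun kk => pvAt m r (c + kk) == "#"))

def init_graph (map_2d : List (List String)) (N : Int) : List (List (List (List (Int × Int × Int × Int)))) :=
  (PySem.List.pyRange 0 N 1).map (fun r =>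
    (PySem.List.pyRange 0 N 1).map (fun c =>
      if pvAt map_2d r c != "." then [] else
      (PySem.List.pyRange 0 5 1).map (fun k =>
        let jump := k + 1
        (if isUpA map_2d N r c jump then [((1 : Int), r - jump, c, k)] else []) ++
        (if isDownA map_2d N r c jump then [((1 : Int), r + jump, c, k)] else []) ++
        (if isLeftA map_2d N r c jump then [((1 : Int), r, c - jump, k)] else []) ++
        (if isRightA map_2d N r c jump then [((1 : Int), r, c + jump, k)] else []) ++
        (if jump < 5 then [((jump + 1) ^ 2, r, c, (jump + 1) - 1)] else []) ++
        (if jump > 1 then (PySem.List.pyRange 1 jump 1).map (fun kk => ((1 : Int), r, c, (jump - kk) - 1)) else []))))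

-- ===== PORT B =====
-- one outward walk per direction: result[j-1] = can a jump of length j land, threading a wall-seen flag
def pvWalk (m : List (List String)) (N r c dr dc : Int) : List Bool :=
  ((PySem.List.pyRange 1 6 1).foldl (fun (st : Bool × List Bool) j =>
      let rr := r + dr * j
      let cc := c + dc * j
      if !(decide (0 ≤ rr) && decide (rr < N) && decide (0 ≤ cc) && decide (cc < N)) then
        (st.1, st.2 ++ [false])
      else if st.1 then (st.1, st.2 ++ [false])
      else
        let ch := pvAt m rr cc
        if ch == "#" then (true, st.2 ++ [false])
        else (st.1, st.2 ++ [ch != "S"])) (false, [])).2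

def init_graph_alt (map_2d : List (List String)) (N : Int) : List (List (List (List (Int × Int × Int × Int)))) :=
  (PySem.List.pyRange 0 N 1).map (fun r =>
    (PySem.List.pyRange 0 N 1).map (fun c =>
      if pvAt map_2d r c != "." then [] else
      let up := pvWalk map_2d N r c (-1) 0
      let down := pvWalk map_2d N r c 1 0
      let left := pvWalk map_2d N r c 0 (-1)
      let right := pvWalk map_2d N r c 0 1
      (PySem.List.pyRange 0 5 1).map (fun k =>
        let jump := k + 1
        (if up.getD k.toNat false then [((1 : Int), r - jump, c, k)] else []) ++
        (if down.getD k.toNat false then [((1 : Int), r + jump, c, k)] else []) ++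
        (if left.getD k.toNat false then [((1 : Int), r, c - jump, k)] else []) ++
        (if right.getD k.toNat false then [((1 : Int), r, c + jump, k)] else []) ++
        (if jump < 5 then [((jump + 1) ^ 2, r, c, jump)] else []) ++
        (PySem.List.pyRange 1 jump 1).map (fun kk => ((1 : Int), r, c, jump - kk - 1)))))

-- ===== PRECONDITION & SPEC =====
-- Pre_ excludes exactly the inputs on which A raises IndexError: grids with fewer than N rows, or a row among the first N with fewer than N entries.
def Pre_init_graph (map_2d : List (List String)) (N : Int) : Prop :=
  N ≤ (map_2d.length : Int) ∧ ∀ row ∈ map_2d.take N.toNat, N ≤ (row.length : Int)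
instance (map_2d : List (List String)) (N : Int) : Decidable (Pre_init_graph map_2d N) := by
  unfold Pre_init_graph; infer_instance

def pvWitness_init_graph : List (List String) × Int := ([[".", "#"], ["S", "."]], 2)

def Spec_init_graph (map_2d : List (List String)) (N : Int) (out : List (List (List (List (Int × Int × Int × Int))))) : Prop := out = init_graph_alt map_2d N
instance (map_2d : List (List String)) (N : Int) (out : List (List (List (List (Int × Int × Int × Int))))) : Decidable (Spec_init_graph map_2d N out) := by
  unfold Spec_init_graph
  exact @instDecidableEqList _ (@instDecidableEqList _ (@instDecidableEqList _ (@instDecidableEqList _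
    (inferInstance : DecidableEq (Int × Int × Int × Int))))) out (init_graph_alt map_2d N)

-- ===== CLAIM (what is proved, stated in full; the proofs are below) =====
def Claim_equal_init_graph : Prop := ∀ (map_2d : List (List String)) (N : Int), Dom_init_graph map_2d N → Pre_init_graph map_2d N → Spec_init_graph map_2d N (init_graph map_2d N)

-- ===== LEMMAS AND PROOFS =====

-- proof-only helper: closed form of the states pvWalk's fold threads along its 5 steps
def pvFlagsSpec (inb : Int → Bool) (ch : Int → String) : List Int → Bool → List Bool
  | [], _ => []
  | j :: t, w =>
    (inb j && !w && !(ch j == "#") && !(ch j == "S")) ::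
      pvFlagsSpec inb ch t (w || (inb j && (ch j == "#")))

theorem pvWalk_eq (m : List (List String)) (N r c dr dc : Int) :
    pvWalk m N r c dr dc =
      pvFlagsSpec
        (fun j => decide (0 ≤ r + dr * j) && decide (r + dr * j < N) && decide (0 ≤ c + dc * j) && decide (c + dc * j < N))
        (fun j => pvAt m (r + dr * j) (c + dc * j)) [1, 2, 3, 4, 5] false := by
  have aux : ∀ (js : List Int) (w : Bool) (acc : List Bool),
      (js.foldl (fun (st : Bool × List Bool) j =>
        let rr := r + dr * j
        let cc := c + dc * j
        if !(decide (0 ≤ rr) && decide (rr < N) && decide (0 ≤ cc) && decide (cc < N)) then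
          (st.1, st.2 ++ [false])
        else if st.1 then (st.1, st.2 ++ [false])
        else
          let ch := pvAt m rr cc
          if ch == "#" then (true, st.2 ++ [false])
          else (st.1, st.2 ++ [ch != "S"])) (w, acc)).2
      = acc ++ pvFlagsSpec
          (fun j => decide (0 ≤ r + dr * j) && decide (r + dr * j < N) && decide (0 ≤ c + dc * j) && decide (c + dc * j < N))
          (fun j => pvAt m (r + dr * j) (c + dc * j)) js w := by
    intro js
    induction js with
    | nil => intro w acc; simp [pvFlagsSpec]
    | cons j t ih =>
      intro w acc
      simp only [List.foldl_cons, pvFlagsSpec]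
      by_cases h1 : (!(decide (0 ≤ r + dr * j) && decide (r + dr * j < N) && decide (0 ≤ c + dc * j) && decide (c + dc * j < N))) = true
      · simp only [h1, if_pos, if_true, ih]
        simp only [Bool.not_eq_true'] at h1
        simp [h1]
      · by_cases h2 : w = true
        · simp only [h1, h2, ih]
          simp only [Bool.not_eq_true, Bool.not_eq_false'] at h1
          simp [h1, h2]
        · by_cases h3 : (pvAt m (r + dr * j) (c + dc * j) == "#") = true
          · simp only [h1, h2, h3, ih]
            simp only [Bool.not_eq_true, Bool.not_eq_false'] at h1
            simp [h1, h2, h3]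
          · simp only [h1, h2, h3, ih]
            simp only [Bool.not_eq_true, Bool.not_eq_false'] at h1
            simp only [Bool.not_eq_true] at h2 h3
            simp [h1, h2, h3, bne]
  unfold pvWalk
  rw [show PySem.List.pyRange 1 6 1 = [1, 2, 3, 4, 5] from by decide]
  exact aux [1, 2, 3, 4, 5] false []


theorem isUpA_decide (m : List (List String)) (N r c jump : Int) :
    isUpA m N r c jump =
      (decide (0 ≤ r - jump) && !(pvAt m (r - jump) c == "S") &&
        !((PySem.List.pyRange 1 (jump + 1) 1).any (fun kk => pvAt m (r - kk) c == "#"))) := by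
  unfold isUpA
  by_cases h : (decide (r - jump < 0) || (pvAt m (r - jump) c == "S")) = true
  · rw [if_pos h]
    rcases Bool.or_eq_true_iff.mp h with h' | h'
    · have hd : decide (0 ≤ r - jump) = false := by
        simp only [decide_eq_true_eq] at h'
        simp only [decide_eq_false_iff_not]
        omega
      rw [hd]
      simp only [Bool.false_and]
    · rw [h']
      simp only [Bool.not_true, Bool.and_false, Bool.false_and]
  · rw [if_neg h]
    simp only [Bool.or_eq_true, not_or, Bool.not_eq_true] at h
    obtain ⟨h1, h2⟩ := h
    have hd : decide (0 ≤ r - jump) = true := by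
      simp only [decide_eq_false_iff_not] at h1
      simp only [decide_eq_true_eq]
      omega
    rw [hd, h2]
    simp only [Bool.not_false, Bool.and_true, Bool.true_and]


theorem isDownA_decide (m : List (List String)) (N r c jump : Int) :
    isDownA m N r c jump =
      (decide (r + jump < N) && !(pvAt m (r + jump) c == "S") &&
        !((PySem.List.pyRange 1 (jump + 1) 1).any (fun kk => pvAt m (r + kk) c == "#"))) := by
  unfold isDownA
  by_cases h : (decide (r + jump > N - 1) || (pvAt m (r + jump) c == "S")) = true
  · rw [if_pos h]
    rcases Bool.or_eq_true_iff.mp h with h' | h'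
    · have hd : decide (r + jump < N) = false := by
        simp only [decide_eq_true_eq] at h'
        simp only [decide_eq_false_iff_not]
        omega
      rw [hd]
      simp only [Bool.false_and]
    · rw [h']
      simp only [Bool.not_true, Bool.and_false, Bool.false_and]
  · rw [if_neg h]
    simp only [Bool.or_eq_true, not_or, Bool.not_eq_true] at h
    obtain ⟨h1, h2⟩ := h
    have hd : decide (r + jump < N) = true := by
      simp only [decide_eq_false_iff_not] at h1
      simp only [decide_eq_true_eq]
      omega
    rw [hd, h2]
    simp only [Bool.not_false, Bool.and_true, Bool.true_and]


theorem isLeftA_decide (m : List (List String)) (N r c jump : Int) :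
    isLeftA m N r c jump =
      (decide (0 ≤ c - jump) && !(pvAt m r (c - jump) == "S") &&
        !((PySem.List.pyRange 1 (jump + 1) 1).any (fun kk => pvAt m r (c - kk) == "#"))) := by
  unfold isLeftA
  by_cases h : (decide (c - jump < 0) || (pvAt m r (c - jump) == "S")) = true
  · rw [if_pos h]
    rcases Bool.or_eq_true_iff.mp h with h' | h'
    · have hd : decide (0 ≤ c - jump) = false := by
        simp only [decide_eq_true_eq] at h'
        simp only [decide_eq_false_iff_not]
        omega
      rw [hd]
      simp only [Bool.false_and]
    · rw [h']
      simp only [Bool.not_true, Bool.and_false, Bool.false_and]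
  · rw [if_neg h]
    simp only [Bool.or_eq_true, not_or, Bool.not_eq_true] at h
    obtain ⟨h1, h2⟩ := h
    have hd : decide (0 ≤ c - jump) = true := by
      simp only [decide_eq_false_iff_not] at h1
      simp only [decide_eq_true_eq]
      omega
    rw [hd, h2]
    simp only [Bool.not_false, Bool.and_true, Bool.true_and]


theorem isRightA_decide (m : List (List String)) (N r c jump : Int) :
    isRightA m N r c jump =
      (decide (c + jump < N) && !(pvAt m r (c + jump) == "S") &&
        !((PySem.List.pyRange 1 (jump + 1) 1).any (fun kk => pvAt m r (c + kk) == "#"))) := by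
  unfold isRightA
  by_cases h : (decide (c + jump > N - 1) || (pvAt m r (c + jump) == "S")) = true
  · rw [if_pos h]
    rcases Bool.or_eq_true_iff.mp h with h' | h'
    · have hd : decide (c + jump < N) = false := by
        simp only [decide_eq_true_eq] at h'
        simp only [decide_eq_false_iff_not]
        omega
      rw [hd]
      simp only [Bool.false_and]
    · rw [h']
      simp only [Bool.not_true, Bool.and_false, Bool.false_and]
  · rw [if_neg h]
    simp only [Bool.or_eq_true, not_or, Bool.not_eq_true] at h
    obtain ⟨h1, h2⟩ := h
    have hd : decide (c + jump < N) = true := by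
      simp only [decide_eq_false_iff_not] at h1
      simp only [decide_eq_true_eq]
      omega
    rw [hd, h2]
    simp only [Bool.not_false, Bool.and_true, Bool.true_and]


theorem walk_up (m : List (List String)) (N r c : Int) (hr : 0 ≤ r) (hrN : r < N)
    (hc : 0 ≤ c) (hcN : c < N) :
    pvWalk m N r c (-1) 0 =
      [isUpA m N r c 1, isUpA m N r c 2, isUpA m N r c 3, isUpA m N r c 4, isUpA m N r c 5] := by
  rw [pvWalk_eq]
  simp only [pvFlagsSpec,
    show r + (-1) * 1 = r - 1 from by ring, show r + (-1) * 2 = r - 2 from by ring,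
    show r + (-1) * 3 = r - 3 from by ring, show r + (-1) * 4 = r - 4 from by ring,
    show r + (-1) * 5 = r - 5 from by ring,
    show c + (0:Int) * 1 = c from by ring, show c + (0:Int) * 2 = c from by ring,
    show c + (0:Int) * 3 = c from by ring, show c + (0:Int) * 4 = c from by ring,
    show c + (0:Int) * 5 = c from by ring,
    show decide (r - 1 < N) = true from by simp; omega,
    show decide (r - 2 < N) = true from by simp; omega,
    show decide (r - 3 < N) = true from by simp; omega,
    show decide (r - 4 < N) = true from by simp; omega,
    show decide (r - 5 < N) = true from by simp; omega,
    show decide (0 ≤ c) = true from by simpa,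
    show decide (c < N) = true from by simpa,
    isUpA_decide,
    show PySem.List.pyRange 1 (1+1) 1 = [1] from by decide,
    show PySem.List.pyRange 1 (2+1) 1 = [1,2] from by decide,
    show PySem.List.pyRange 1 (3+1) 1 = [1,2,3] from by decide,
    show PySem.List.pyRange 1 (4+1) 1 = [1,2,3,4] from by decide,
    show PySem.List.pyRange 1 (5+1) 1 = [1,2,3,4,5] from by decide,
    List.any_cons, List.any_nil, Bool.and_true, Bool.true_and, Bool.or_false, Bool.false_or,
    Bool.not_false]
  have m2 : decide (0 ≤ r - 2) = true → decide (0 ≤ r - 1) = true := by simp; omega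
  have m3 : decide (0 ≤ r - 3) = true → decide (0 ≤ r - 2) = true := by simp; omega
  have m4 : decide (0 ≤ r - 4) = true → decide (0 ≤ r - 3) = true := by simp; omega
  have m5 : decide (0 ≤ r - 5) = true → decide (0 ≤ r - 4) = true := by simp; omega
  revert m2 m3 m4 m5
  generalize (pvAt m (r - 1) c == "#") = a1
  generalize (pvAt m (r - 2) c == "#") = a2
  generalize (pvAt m (r - 3) c == "#") = a3
  generalize (pvAt m (r - 4) c == "#") = a4
  generalize (pvAt m (r - 5) c == "#") = a5
  generalize (pvAt m (r - 1) c == "S") = s1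
  generalize (pvAt m (r - 2) c == "S") = s2
  generalize (pvAt m (r - 3) c == "S") = s3
  generalize (pvAt m (r - 4) c == "S") = s4
  generalize (pvAt m (r - 5) c == "S") = s5
  generalize decide (0 ≤ r - 1) = d1
  generalize decide (0 ≤ r - 2) = d2
  generalize decide (0 ≤ r - 3) = d3
  generalize decide (0 ≤ r - 4) = d4
  generalize decide (0 ≤ r - 5) = d5
  cases d1 <;> cases d2 <;> cases d3 <;> cases d4 <;> cases d5 <;> intro m2 m3 m4 m5 <;>
    first
      | exact absurd (m2 rfl) (by decide)
      | exact absurd (m3 rfl) (by decide)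
      | exact absurd (m4 rfl) (by decide)
      | exact absurd (m5 rfl) (by decide)
      | (clear m2 m3 m4 m5; revert a1 a2 a3 a4 a5 s1 s2 s3 s4 s5; decide)

theorem walk_down (m : List (List String)) (N r c : Int) (hr : 0 ≤ r) (hrN : r < N)
    (hc : 0 ≤ c) (hcN : c < N) :
    pvWalk m N r c 1 0 =
      [isDownA m N r c 1, isDownA m N r c 2, isDownA m N r c 3, isDownA m N r c 4, isDownA m N r c 5] := by
  rw [pvWalk_eq]
  simp only [pvFlagsSpec,
    show r + (1:Int) * 1 = r + 1 from by ring, show r + (1:Int) * 2 = r + 2 from by ring,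
    show r + (1:Int) * 3 = r + 3 from by ring, show r + (1:Int) * 4 = r + 4 from by ring,
    show r + (1:Int) * 5 = r + 5 from by ring,
    show c + (0:Int) * 1 = c from by ring, show c + (0:Int) * 2 = c from by ring,
    show c + (0:Int) * 3 = c from by ring, show c + (0:Int) * 4 = c from by ring,
    show c + (0:Int) * 5 = c from by ring,
    show decide (0 ≤ r + 1) = true from by simp; omega,
    show decide (0 ≤ r + 2) = true from by simp; omega,
    show decide (0 ≤ r + 3) = true from by simp; omega,
    show decide (0 ≤ r + 4) = true from by simp; omega,
    show decide (0 ≤ r + 5) = true from by simp; omega,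
    show decide (0 ≤ c) = true from by simpa,
    show decide (c < N) = true from by simpa,
    isDownA_decide,
    show PySem.List.pyRange 1 (1+1) 1 = [1] from by decide,
    show PySem.List.pyRange 1 (2+1) 1 = [1,2] from by decide,
    show PySem.List.pyRange 1 (3+1) 1 = [1,2,3] from by decide,
    show PySem.List.pyRange 1 (4+1) 1 = [1,2,3,4] from by decide,
    show PySem.List.pyRange 1 (5+1) 1 = [1,2,3,4,5] from by decide,
    List.any_cons, List.any_nil, Bool.and_true, Bool.true_and, Bool.or_false, Bool.false_or,
    Bool.not_false]
  have m2 : decide (r + 2 < N) = true → decide (r + 1 < N) = true := by simp; omega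
  have m3 : decide (r + 3 < N) = true → decide (r + 2 < N) = true := by simp; omega
  have m4 : decide (r + 4 < N) = true → decide (r + 3 < N) = true := by simp; omega
  have m5 : decide (r + 5 < N) = true → decide (r + 4 < N) = true := by simp; omega
  revert m2 m3 m4 m5
  generalize (pvAt m (r + 1) c == "#") = a1
  generalize (pvAt m (r + 2) c == "#") = a2
  generalize (pvAt m (r + 3) c == "#") = a3
  generalize (pvAt m (r + 4) c == "#") = a4
  generalize (pvAt m (r + 5) c == "#") = a5
  generalize (pvAt m (r + 1) c == "S") = s1
  generalize (pvAt m (r + 2) c == "S") = s2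
  generalize (pvAt m (r + 3) c == "S") = s3
  generalize (pvAt m (r + 4) c == "S") = s4
  generalize (pvAt m (r + 5) c == "S") = s5
  generalize decide (r + 1 < N) = d1
  generalize decide (r + 2 < N) = d2
  generalize decide (r + 3 < N) = d3
  generalize decide (r + 4 < N) = d4
  generalize decide (r + 5 < N) = d5
  cases d1 <;> cases d2 <;> cases d3 <;> cases d4 <;> cases d5 <;> intro m2 m3 m4 m5 <;>
    first
      | exact absurd (m2 rfl) (by decide)
      | exact absurd (m3 rfl) (by decide)
      | exact absurd (m4 rfl) (by decide)
      | exact absurd (m5 rfl) (by decide)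
      | (clear m2 m3 m4 m5; revert a1 a2 a3 a4 a5 s1 s2 s3 s4 s5; decide)

theorem walk_left (m : List (List String)) (N r c : Int) (hr : 0 ≤ r) (hrN : r < N)
    (hc : 0 ≤ c) (hcN : c < N) :
    pvWalk m N r c 0 (-1) =
      [isLeftA m N r c 1, isLeftA m N r c 2, isLeftA m N r c 3, isLeftA m N r c 4, isLeftA m N r c 5] := by
  rw [pvWalk_eq]
  simp only [pvFlagsSpec,
    show c + (-1) * 1 = c - 1 from by ring, show c + (-1) * 2 = c - 2 from by ring,
    show c + (-1) * 3 = c - 3 from by ring, show c + (-1) * 4 = c - 4 from by ring,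
    show c + (-1) * 5 = c - 5 from by ring,
    show r + (0:Int) * 1 = r from by ring, show r + (0:Int) * 2 = r from by ring,
    show r + (0:Int) * 3 = r from by ring, show r + (0:Int) * 4 = r from by ring,
    show r + (0:Int) * 5 = r from by ring,
    show decide (c - 1 < N) = true from by simp; omega,
    show decide (c - 2 < N) = true from by simp; omega,
    show decide (c - 3 < N) = true from by simp; omega,
    show decide (c - 4 < N) = true from by simp; omega,
    show decide (c - 5 < N) = true from by simp; omega,
    show decide (0 ≤ r) = true from by simpa,
    show decide (r < N) = true from by simpa,
    isLeftA_decide,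
    show PySem.List.pyRange 1 (1+1) 1 = [1] from by decide,
    show PySem.List.pyRange 1 (2+1) 1 = [1,2] from by decide,
    show PySem.List.pyRange 1 (3+1) 1 = [1,2,3] from by decide,
    show PySem.List.pyRange 1 (4+1) 1 = [1,2,3,4] from by decide,
    show PySem.List.pyRange 1 (5+1) 1 = [1,2,3,4,5] from by decide,
    List.any_cons, List.any_nil, Bool.and_true, Bool.true_and, Bool.or_false, Bool.false_or,
    Bool.not_false]
  have m2 : decide (0 ≤ c - 2) = true → decide (0 ≤ c - 1) = true := by simp; omega
  have m3 : decide (0 ≤ c - 3) = true → decide (0 ≤ c - 2) = true := by simp; omega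
  have m4 : decide (0 ≤ c - 4) = true → decide (0 ≤ c - 3) = true := by simp; omega
  have m5 : decide (0 ≤ c - 5) = true → decide (0 ≤ c - 4) = true := by simp; omega
  revert m2 m3 m4 m5
  generalize (pvAt m r (c - 1) == "#") = a1
  generalize (pvAt m r (c - 2) == "#") = a2
  generalize (pvAt m r (c - 3) == "#") = a3
  generalize (pvAt m r (c - 4) == "#") = a4
  generalize (pvAt m r (c - 5) == "#") = a5
  generalize (pvAt m r (c - 1) == "S") = s1
  generalize (pvAt m r (c - 2) == "S") = s2
  generalize (pvAt m r (c - 3) == "S") = s3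
  generalize (pvAt m r (c - 4) == "S") = s4
  generalize (pvAt m r (c - 5) == "S") = s5
  generalize decide (0 ≤ c - 1) = d1
  generalize decide (0 ≤ c - 2) = d2
  generalize decide (0 ≤ c - 3) = d3
  generalize decide (0 ≤ c - 4) = d4
  generalize decide (0 ≤ c - 5) = d5
  cases d1 <;> cases d2 <;> cases d3 <;> cases d4 <;> cases d5 <;> intro m2 m3 m4 m5 <;>
    first
      | exact absurd (m2 rfl) (by decide)
      | exact absurd (m3 rfl) (by decide)
      | exact absurd (m4 rfl) (by decide)
      | exact absurd (m5 rfl) (by decide)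
      | (clear m2 m3 m4 m5; revert a1 a2 a3 a4 a5 s1 s2 s3 s4 s5; decide)

theorem walk_right (m : List (List String)) (N r c : Int) (hr : 0 ≤ r) (hrN : r < N)
    (hc : 0 ≤ c) (hcN : c < N) :
    pvWalk m N r c 0 1 =
      [isRightA m N r c 1, isRightA m N r c 2, isRightA m N r c 3, isRightA m N r c 4, isRightA m N r c 5] := by
  rw [pvWalk_eq]
  simp only [pvFlagsSpec,
    show c + (1:Int) * 1 = c + 1 from by ring, show c + (1:Int) * 2 = c + 2 from by ring,
    show c + (1:Int) * 3 = c + 3 from by ring, show c + (1:Int) * 4 = c + 4 from by ring,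
    show c + (1:Int) * 5 = c + 5 from by ring,
    show r + (0:Int) * 1 = r from by ring, show r + (0:Int) * 2 = r from by ring,
    show r + (0:Int) * 3 = r from by ring, show r + (0:Int) * 4 = r from by ring,
    show r + (0:Int) * 5 = r from by ring,
    show decide (0 ≤ c + 1) = true from by simp; omega,
    show decide (0 ≤ c + 2) = true from by simp; omega,
    show decide (0 ≤ c + 3) = true from by simp; omega,
    show decide (0 ≤ c + 4) = true from by simp; omega,
    show decide (0 ≤ c + 5) = true from by simp; omega,
    show decide (0 ≤ r) = true from by simpa,
    show decide (r < N) = true from by simpa,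
    isRightA_decide,
    show PySem.List.pyRange 1 (1+1) 1 = [1] from by decide,
    show PySem.List.pyRange 1 (2+1) 1 = [1,2] from by decide,
    show PySem.List.pyRange 1 (3+1) 1 = [1,2,3] from by decide,
    show PySem.List.pyRange 1 (4+1) 1 = [1,2,3,4] from by decide,
    show PySem.List.pyRange 1 (5+1) 1 = [1,2,3,4,5] from by decide,
    List.any_cons, List.any_nil, Bool.and_true, Bool.true_and, Bool.or_false, Bool.false_or,
    Bool.not_false]
  have m2 : decide (c + 2 < N) = true → decide (c + 1 < N) = true := by simp; omega
  have m3 : decide (c + 3 < N) = true → decide (c + 2 < N) = true := by simp; omega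
  have m4 : decide (c + 4 < N) = true → decide (c + 3 < N) = true := by simp; omega
  have m5 : decide (c + 5 < N) = true → decide (c + 4 < N) = true := by simp; omega
  revert m2 m3 m4 m5
  generalize (pvAt m r (c + 1) == "#") = a1
  generalize (pvAt m r (c + 2) == "#") = a2
  generalize (pvAt m r (c + 3) == "#") = a3
  generalize (pvAt m r (c + 4) == "#") = a4
  generalize (pvAt m r (c + 5) == "#") = a5
  generalize (pvAt m r (c + 1) == "S") = s1
  generalize (pvAt m r (c + 2) == "S") = s2
  generalize (pvAt m r (c + 3) == "S") = s3
  generalize (pvAt m r (c + 4) == "S") = s4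
  generalize (pvAt m r (c + 5) == "S") = s5
  generalize decide (c + 1 < N) = d1
  generalize decide (c + 2 < N) = d2
  generalize decide (c + 3 < N) = d3
  generalize decide (c + 4 < N) = d4
  generalize decide (c + 5 < N) = d5
  cases d1 <;> cases d2 <;> cases d3 <;> cases d4 <;> cases d5 <;> intro m2 m3 m4 m5 <;>
    first
      | exact absurd (m2 rfl) (by decide)
      | exact absurd (m3 rfl) (by decide)
      | exact absurd (m4 rfl) (by decide)
      | exact absurd (m5 rfl) (by decide)
      | (clear m2 m3 m4 m5; revert a1 a2 a3 a4 a5 s1 s2 s3 s4 s5; decide)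

theorem init_graph_spec : Claim_equal_init_graph := by
  intro m N _ _
  unfold Spec_init_graph init_graph init_graph_alt
  refine List.map_congr_left (fun r hrm => ?_)
  rw [PySem.List.mem_pyRange_one] at hrm
  refine List.map_congr_left (fun c hcm => ?_)
  rw [PySem.List.mem_pyRange_one] at hcm
  by_cases hdot : (pvAt m r c != ".") = true
  · simp only [if_pos hdot]
  · simp only [if_neg hdot,
      walk_up m N r c hrm.1 hrm.2 hcm.1 hcm.2,
      walk_down m N r c hrm.1 hrm.2 hcm.1 hcm.2,
      walk_left m N r c hrm.1 hrm.2 hcm.1 hcm.2,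
      walk_right m N r c hrm.1 hrm.2 hcm.1 hcm.2,
      show PySem.List.pyRange 0 5 1 = [0, 1, 2, 3, 4] from by decide,
      List.map]
    norm_num [List.getD,
      show Int.toNat 0 = 0 from rfl, show Int.toNat 1 = 1 from rfl,
      show Int.toNat 2 = 2 from rfl, show Int.toNat 3 = 3 from rfl,
      show Int.toNat 4 = 4 from rfl,
      show ∀ x1 x2 x3 x4 x5 : Bool, [x1, x2, x3, x4, x5].getD 0 false = x1 from fun _ _ _ _ _ => rfl,
      show ∀ x1 x2 x3 x4 x5 : Bool, [x1, x2, x3, x4, x5].getD 1 false = x2 from fun _ _ _ _ _ => rfl,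
      show ∀ x1 x2 x3 x4 x5 : Bool, [x1, x2, x3, x4, x5].getD 2 false = x3 from fun _ _ _ _ _ => rfl,
      show ∀ x1 x2 x3 x4 x5 : Bool, [x1, x2, x3, x4, x5].getD 3 false = x4 from fun _ _ _ _ _ => rfl,
      show ∀ x1 x2 x3 x4 x5 : Bool, [x1, x2, x3, x4, x5].getD 4 false = x5 from fun _ _ _ _ _ => rfl]
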